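-- pv_equiv track=rewrite | github.com/toane/Congruence | DBFace.py | compute_global_wordcount
-- ===== SOURCE A (Python) =====
-- from typing import List, Dict, Tuple
--
-- def compute_global_wordcount(wordcount: List[Tuple]) -> Dict:
--     """
--     sorts wordcount aggregate by word type
--     :param wordcount:
--     :return:
--     """
--     # noms_propres = filter(lambda item : item[0][1] == "NAME", wordcount)
--     # organisations = filter(lambda item : item[0][1] == "ORGANIZATION", wordcount)
--     # noms_communs = filter(lambda item : item[0][1] == "TOPIC", wordcount)
--
--     noms_propres = [item for item in wordcount if item[0][1] == "PERSON"]
--     organisations = [item for item in wordcount if item[0][1] == "ORGANIZATION"]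
--     noms_communs = [item for item in wordcount if item[0][1] == "TOPIC"]
--
--     return {
--         "people": noms_propres,
--         "orgas": organisations,
--         "nouns": noms_communs
--         }
-- ===== SOURCE B (Python) =====
-- from typing import List, Dict, Tuple
--
-- def compute_global_wordcount(wordcount: List[Tuple]) -> Dict:
--     people, orgas, nouns = [], [], []
--     for item in wordcount:
--         label = item[0][1]
--         if label == "PERSON":
--             people.append(item)
--         elif label == "ORGANIZATION":
--             orgas.append(item)
--         elif label == "TOPIC":
--             nouns.append(item)
--     return {"people": people, "orgas": orgas, "nouns": nouns}
-- ===== Notes on version B (the rewrite author's own statement) =====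
-- stated objective: simpler
-- what changed: Replaces three separate filtering passes over wordcount with one dispatch loop that appends each item to the matching bucket.
import Mathlib
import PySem

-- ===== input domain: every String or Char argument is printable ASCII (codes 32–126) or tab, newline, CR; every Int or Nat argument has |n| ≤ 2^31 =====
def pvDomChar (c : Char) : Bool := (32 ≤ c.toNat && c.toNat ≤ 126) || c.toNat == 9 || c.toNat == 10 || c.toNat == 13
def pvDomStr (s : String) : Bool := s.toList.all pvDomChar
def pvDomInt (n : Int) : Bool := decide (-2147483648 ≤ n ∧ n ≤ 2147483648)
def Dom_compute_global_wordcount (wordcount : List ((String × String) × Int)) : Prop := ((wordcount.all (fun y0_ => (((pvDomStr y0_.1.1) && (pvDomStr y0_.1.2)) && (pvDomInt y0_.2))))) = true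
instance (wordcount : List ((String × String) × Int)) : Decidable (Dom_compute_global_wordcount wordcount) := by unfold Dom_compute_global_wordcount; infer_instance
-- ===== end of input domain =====

-- B replaces A's three filtering passes with one dispatch loop over wordcount (objective: simpler).


-- ===== PORT A =====
-- Three list comprehensions (filters), then the dict literal as an association list.
def compute_global_wordcount (wordcount : List ((String × String) × Int)) : List (String × List ((String × String) × Int)) :=
  let noms_propres := wordcount.filter (fun item => item.1.2 == "PERSON")
  let organisations := wordcount.filter (fun item => item.1.2 == "ORGANIZATION")
  let noms_communs := wordcount.filter (fun item => item.1.2 == "TOPIC")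
  [("people", noms_propres), ("orgas", organisations), ("nouns", noms_communs)]

-- ===== PORT B =====
-- Single pass with three accumulators, appending each item to the matching bucket.
def pvGoB (people orgas nouns : List ((String × String) × Int)) :
    List ((String × String) × Int) → List (String × List ((String × String) × Int))
  | [] => [("people", people), ("orgas", orgas), ("nouns", nouns)]
  | item :: rest =>
      let label := item.1.2
      if label == "PERSON" then pvGoB (people ++ [item]) orgas nouns rest
      else if label == "ORGANIZATION" then pvGoB people (orgas ++ [item]) nouns rest
      else if label == "TOPIC" then pvGoB people orgas (nouns ++ [item]) rest
      else pvGoB people orgas nouns rest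

def compute_global_wordcount_alt (wordcount : List ((String × String) × Int)) : List (String × List ((String × String) × Int)) :=
  pvGoB [] [] [] wordcount

-- ===== PRECONDITION & SPEC =====
def Spec_compute_global_wordcount (wordcount : List ((String × String) × Int)) (out : List (String × List ((String × String) × Int))) : Prop := out = compute_global_wordcount_alt wordcount
instance (wordcount : List ((String × String) × Int)) (out : List (String × List ((String × String) × Int))) : Decidable (Spec_compute_global_wordcount wordcount out) := by unfold Spec_compute_global_wordcount; infer_instance

-- ===== CLAIM (what is proved, stated in full; the proofs are below) =====
def Claim_equal_compute_global_wordcount : Prop := ∀ (wordcount : List ((String × String) × Int)), Dom_compute_global_wordcount wordcount → Spec_compute_global_wordcount wordcount (compute_global_wordcount wordcount)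

-- ===== LEMMAS AND PROOFS =====
theorem pvGoB_eq (l : List ((String × String) × Int)) :
    ∀ p o n, pvGoB p o n l =
      [("people", p ++ l.filter (fun item => item.1.2 == "PERSON")),
       ("orgas", o ++ l.filter (fun item => item.1.2 == "ORGANIZATION")),
       ("nouns", n ++ l.filter (fun item => item.1.2 == "TOPIC"))] := by
  induction l with
  | nil => intro p o n; simp [pvGoB]
  | cons item rest ih =>
      intro p o n
      simp only [pvGoB]
      by_cases h1 : item.1.2 == "PERSON"
      · have h2 : ¬ (item.1.2 == "ORGANIZATION") := by simp_all
        have h3 : ¬ (item.1.2 == "TOPIC") := by simp_all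
        simp [h1, h2, h3, ih]
      · by_cases h2 : item.1.2 == "ORGANIZATION"
        · have h3 : ¬ (item.1.2 == "TOPIC") := by simp_all
          simp [h1, h2, h3, ih]
        · by_cases h3 : item.1.2 == "TOPIC"
          · simp [h1, h2, h3, ih]
          · simp [h1, h2, h3, ih]

-- ===== VERDICT (by name: the statement is the Claim_ definition above) =====
theorem compute_global_wordcount_spec : Claim_equal_compute_global_wordcount := by
  intro wordcount _
  unfold Spec_compute_global_wordcount compute_global_wordcount compute_global_wordcount_alt
  simp [pvGoB_eq]
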